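-- pv_equiv track=rewrite | github.com/Vedanshi-Shah/Health-Assist | ChatBot_Health/bot.py | general_done
-- ===== SOURCE A (Python) =====
-- intents_initial = ["AbdomenPain","ChestPain"]
--
-- intents_intermidiate = ["UpRightAbdPain","CentralAbdPain","AroundCentAbdPain","LowerAbdPain","LeftShoulderPain","BurningPain","LocalisedPain","Breating"]
--
-- intents_final = ["Vomit","Jaundice","Weight","Diarreha","Fever","Nausea","No","Uneasiness", "Sweating"]
--
-- def general_done(user_intents):
--     initial = False
--     intermidiate = False
--     final = False
--     for intent in user_intents:
--         if intent in intents_initial: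
--             initial = True
--         elif intent in intents_intermidiate:
--             intermidiate = True
--         elif intent in intents_final:
--             final = True
--     if (final and initial and intermidiate):
--         return True
--     return False
-- ===== SOURCE B (Python) =====
-- intents_initial = ["AbdomenPain","ChestPain"]
--
-- intents_intermidiate = ["UpRightAbdPain","CentralAbdPain","AroundCentAbdPain","LowerAbdPain","LeftShoulderPain","BurningPain","LocalisedPain","Breating"]
--
-- intents_final = ["Vomit","Jaundice","Weight","Diarreha","Fever","Nausea","No","Uneasiness", "Sweating"]
--
-- def general_done(user_intents):
--     items = list(user_intents)
--     return (any(x in intents_initial for x in items)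
--             and any(x in intents_intermidiate for x in items)
--             and any(x in intents_final for x in items))
-- ===== Notes on version B (the rewrite author's own statement) =====
-- stated objective: simpler
-- what changed: Replaced the single flag-accumulating elif loop with a conjunction of three independent any-membership checks over the materialized list (valid because the three category lists are disjoint).
import Mathlib
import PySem

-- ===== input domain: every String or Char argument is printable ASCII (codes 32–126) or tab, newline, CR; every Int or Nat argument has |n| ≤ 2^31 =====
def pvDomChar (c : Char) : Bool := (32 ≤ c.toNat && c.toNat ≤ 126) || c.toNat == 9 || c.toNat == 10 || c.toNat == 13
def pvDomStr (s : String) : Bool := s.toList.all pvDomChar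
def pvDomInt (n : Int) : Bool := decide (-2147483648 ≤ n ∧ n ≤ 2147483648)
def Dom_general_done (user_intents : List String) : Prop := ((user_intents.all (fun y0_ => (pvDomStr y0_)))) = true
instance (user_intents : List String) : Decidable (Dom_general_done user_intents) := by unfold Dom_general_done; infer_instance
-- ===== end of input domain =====

-- B replaces A's single flag-accumulating elif loop by a conjunction of three independent
-- any-membership checks (objective: simpler).

def intents_initial : List String := ["AbdomenPain","ChestPain"]
def intents_intermidiate : List String := ["UpRightAbdPain","CentralAbdPain","AroundCentAbdPain","LowerAbdPain","LeftShoulderPain","BurningPain","LocalisedPain","Breating"]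
def intents_final : List String := ["Vomit","Jaundice","Weight","Diarreha","Fever","Nausea","No","Uneasiness", "Sweating"]

-- ===== PORT A =====
-- A's for-loop over user_intents carrying the three flags, elif chain in source order.
def gdLoop : List String → Bool → Bool → Bool → Bool × Bool × Bool
  | [], i, m, f => (i, m, f)
  | x :: xs, i, m, f =>
    if intents_initial.contains x then gdLoop xs true m f
    else if intents_intermidiate.contains x then gdLoop xs i true f
    else if intents_final.contains x then gdLoop xs i m true
    else gdLoop xs i m f

def general_done (user_intents : List String) : Bool :=
  let r := gdLoop user_intents false false false
  if r.2.2 && r.1 && r.2.1 then true else false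

-- ===== PORT B =====
def general_done_alt (user_intents : List String) : Bool :=
  let items := user_intents
  (items.any (fun x => intents_initial.contains x)) &&
  (items.any (fun x => intents_intermidiate.contains x)) &&
  (items.any (fun x => intents_final.contains x))

-- ===== PRECONDITION & SPEC =====
def Spec_general_done (user_intents : List String) (out : Bool) : Prop := out = general_done_alt user_intents
instance (user_intents : List String) (out : Bool) : Decidable (Spec_general_done user_intents out) := by unfold Spec_general_done; infer_instance

-- ===== CLAIM (what is proved, stated in full; the proofs are below) =====
def Claim_equal_general_done : Prop := ∀ (user_intents : List String), Dom_general_done user_intents → Spec_general_done user_intents (general_done user_intents)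

-- ===== LEMMAS AND PROOFS =====

theorem gdLoop_eq (xs : List String) : ∀ (i m f : Bool),
    gdLoop xs i m f =
      (i || xs.any (fun x => intents_initial.contains x),
       m || xs.any (fun x => !intents_initial.contains x && intents_intermidiate.contains x),
       f || xs.any (fun x => !intents_initial.contains x && !intents_intermidiate.contains x && intents_final.contains x)) := by
  induction xs with
  | nil => intro i m f; simp [gdLoop]
  | cons x xs ih =>
    intro i m f
    simp only [gdLoop, List.any_cons]
    split_ifs with h1 h2 h3 <;> rw [ih] <;>
      simp only [Bool.not_eq_true] at * <;>
      simp only [*, Bool.not_true, Bool.not_false, Bool.true_and, Bool.false_and,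
        Bool.and_false, Bool.false_or, Bool.true_or, Bool.or_true]

theorem mid_not_init (x : String) (h : intents_intermidiate.contains x = true) :
    intents_initial.contains x = false := by
  simp only [intents_intermidiate, List.contains_cons, List.contains_nil,
    Bool.or_eq_true, beq_iff_eq] at h
  rcases h with h|h|h|h|h|h|h|h|h <;> first | (subst h; decide) | cases h

theorem fin_not_init (x : String) (h : intents_final.contains x = true) :
    intents_initial.contains x = false := by
  simp only [intents_final, List.contains_cons, List.contains_nil,
    Bool.or_eq_true, beq_iff_eq] at h
  rcases h with h|h|h|h|h|h|h|h|h|h <;> first | (subst h; decide) | cases h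

theorem fin_not_mid (x : String) (h : intents_final.contains x = true) :
    intents_intermidiate.contains x = false := by
  simp only [intents_final, List.contains_cons, List.contains_nil,
    Bool.or_eq_true, beq_iff_eq] at h
  rcases h with h|h|h|h|h|h|h|h|h|h <;> first | (subst h; decide) | cases h

theorem mid_pred (x : String) :
    (!intents_initial.contains x && intents_intermidiate.contains x) = intents_intermidiate.contains x := by
  cases h : intents_intermidiate.contains x
  · simp
  · rw [mid_not_init x h]; rfl

theorem fin_pred (x : String) :
    (!intents_initial.contains x && !intents_intermidiate.contains x && intents_final.contains x) = intents_final.contains x := by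
  cases h : intents_final.contains x
  · simp
  · rw [fin_not_init x h, fin_not_mid x h]; rfl

-- ===== VERDICT (by name: the statement is the Claim_ definition above) =====
theorem general_done_spec : Claim_equal_general_done := by
  intro u _
  unfold Spec_general_done general_done general_done_alt
  rw [gdLoop_eq]
  simp only [Bool.false_or]
  rw [funext mid_pred, funext fin_pred]
  cases u.any (fun x => intents_initial.contains x) <;>
  cases u.any (fun x => intents_intermidiate.contains x) <;>
  cases u.any (fun x => intents_final.contains x) <;> simp
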